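-- pv_equiv track=rewrite | github.com/sykesva/SAGER | scorer_class.py | rem_epochs_bounds
-- ===== SOURCE A (Python) =====
-- from itertools import groupby
--
-- def rem_epochs_bounds(hypno):
--     scoring = [(int(el[0]), len(list(el[1]))) for el in groupby(hypno)]
--     cur_idx, i = 0, 0
--     rems = []
--     while i < len(scoring):
--         if scoring[i][0] == 2:
--             rems.append((cur_idx, cur_idx+scoring[i][1]))
--         cur_idx += scoring[i][1]
--         i += 1
--     return rems
-- ===== SOURCE B (Python) =====
-- def rem_epochs_bounds(hypno):
--     if not hypno:
--         return []
--     rems = []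
--     start = 0
--     val = hypno[0]
--     for i in range(1, len(hypno)):
--         x = hypno[i]
--         if x != val:
--             if int(val) == 2:
--                 rems.append((start, i))
--             start, val = i, x
--     if int(val) == 2:
--         rems.append((start, len(hypno)))
--     return rems
-- ===== Notes on version B (the rewrite author's own statement) =====
-- stated objective: faster
-- what changed: Replaces the groupby-then-index-while two-phase version with a single pass that tracks the current run's start index and value, emitting bounds as runs close, with no intermediate run-length list.
import Mathlib
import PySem

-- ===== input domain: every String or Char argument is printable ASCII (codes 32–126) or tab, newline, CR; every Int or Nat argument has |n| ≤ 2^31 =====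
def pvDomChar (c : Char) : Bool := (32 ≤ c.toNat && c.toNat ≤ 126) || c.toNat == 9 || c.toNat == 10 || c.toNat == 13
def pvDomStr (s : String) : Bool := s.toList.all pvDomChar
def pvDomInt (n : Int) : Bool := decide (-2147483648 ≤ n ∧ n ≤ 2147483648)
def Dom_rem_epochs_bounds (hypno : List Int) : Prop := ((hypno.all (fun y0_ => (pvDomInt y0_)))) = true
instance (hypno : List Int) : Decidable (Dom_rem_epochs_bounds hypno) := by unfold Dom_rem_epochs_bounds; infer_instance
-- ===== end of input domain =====

-- B replaces the groupby-then-while two-phase version with one pass tracking the current run's start; objective: simpler.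

-- ===== PORT A =====
-- itertools.groupby over ints: leading run length + remainder
def pvRunLen (x : Int) : List Int → Int × List Int
  | [] => (1, [])
  | y :: ys => if y = x then ((pvRunLen x ys).1 + 1, (pvRunLen x ys).2) else (1, y :: ys)

theorem pvRunLen_snd_length (x : Int) (xs : List Int) : (pvRunLen x xs).2.length ≤ xs.length := by
  induction xs with
  | nil => simp [pvRunLen]
  | cons y ys ih =>
    simp only [pvRunLen]
    split
    · exact Nat.le_succ_of_le ih
    · simp

-- scoring = [(int(el[0]), len(list(el[1]))) for el in groupby(hypno)]
def pvGroupby : List Int → List (Int × Int)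
  | [] => []
  | x :: xs => (x, (pvRunLen x xs).1) :: pvGroupby (pvRunLen x xs).2
termination_by l => l.length
decreasing_by
  have := pvRunLen_snd_length x xs
  simp only [List.length_cons]; omega

-- the while loop over scoring with cur_idx and rems
def pvWhileA (scoring : List (Int × Int)) (cur_idx : Int) (rems : List (Int × Int)) : List (Int × Int) :=
  match scoring with
  | [] => rems
  | (v, c) :: rest =>
    pvWhileA rest (cur_idx + c) (if v = 2 then rems ++ [(cur_idx, cur_idx + c)] else rems)

def rem_epochs_bounds (hypno : List Int) : List (Int × Int) :=
  pvWhileA (pvGroupby hypno) 0 []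

-- ===== PORT B =====
-- single pass: (rems, start, val) state, index i over the tail; final close with i = len hypno
def pvLoopB (rems : List (Int × Int)) (start val i : Int) : List Int → List (Int × Int)
  | [] => if val = 2 then rems ++ [(start, i)] else rems
  | x :: xs =>
    if x ≠ val then
      pvLoopB (if val = 2 then rems ++ [(start, i)] else rems) i x (i + 1) xs
    else
      pvLoopB rems start val (i + 1) xs

def rem_epochs_bounds_alt (hypno : List Int) : List (Int × Int) :=
  match hypno with
  | [] => []
  | x :: xs => pvLoopB [] 0 x 1 xs

-- ===== PRECONDITION & SPEC =====
def Spec_rem_epochs_bounds (hypno : List Int) (out : List (Int × Int)) : Prop := out = rem_epochs_bounds_alt hypno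
instance (hypno : List Int) (out : List (Int × Int)) : Decidable (Spec_rem_epochs_bounds hypno out) := by unfold Spec_rem_epochs_bounds; infer_instance

-- ===== CLAIM (what is proved, stated in full; the proofs are below) =====
def Claim_equal_rem_epochs_bounds : Prop := ∀ (hypno : List Int), Dom_rem_epochs_bounds hypno → Spec_rem_epochs_bounds hypno (rem_epochs_bounds hypno)

-- ===== LEMMAS AND PROOFS =====

theorem pvGroupby_nil : pvGroupby [] = [] := by rw [pvGroupby]

theorem pvGroupby_cons (x : Int) (xs : List Int) :
    pvGroupby (x :: xs) = (x, (pvRunLen x xs).1) :: pvGroupby (pvRunLen x xs).2 := by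
  rw [pvGroupby]

theorem pvRunLen_cons_self (v : Int) (xs : List Int) :
    pvRunLen v (v :: xs) = ((pvRunLen v xs).1 + 1, (pvRunLen v xs).2) := by
  simp [pvRunLen]

theorem pvRunLen_cons_ne (v x : Int) (xs : List Int) (h : x ≠ v) :
    pvRunLen v (x :: xs) = (1, x :: xs) := by
  simp [pvRunLen, h]

-- reference form: per-group emission without accumulator
def pvScan (cur : Int) : List (Int × Int) → List (Int × Int)
  | [] => []
  | (v, c) :: rest => (if v = 2 then [(cur, cur + c)] else []) ++ pvScan (cur + c) rest

def pvScanRuns (cur : Int) (l : List Int) : List (Int × Int) := pvScan cur (pvGroupby l)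

theorem pvScanRuns_nil (cur : Int) : pvScanRuns cur [] = [] := by
  simp [pvScanRuns, pvGroupby_nil, pvScan]

theorem pvScanRuns_cons (cur : Int) (x : Int) (xs : List Int) :
    pvScanRuns cur (x :: xs) =
      (if x = 2 then [(cur, cur + (pvRunLen x xs).1)] else [])
        ++ pvScanRuns (cur + (pvRunLen x xs).1) (pvRunLen x xs).2 := by
  simp [pvScanRuns, pvGroupby_cons, pvScan]

theorem pvWhileA_eq (g : List (Int × Int)) : ∀ cur acc, pvWhileA g cur acc = acc ++ pvScan cur g := by
  induction g with
  | nil => intro cur acc; simp [pvWhileA, pvScan]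
  | cons p rest ih =>
    intro cur acc
    obtain ⟨v, c⟩ := p
    simp only [pvWhileA, pvScan, ih]
    split <;> simp

theorem pvLoopB_eq (xs : List Int) : ∀ (acc : List (Int × Int)) (s v i : Int),
    pvLoopB acc s v i xs =
      acc ++ (if v = 2 then [(s, i + (pvRunLen v xs).1 - 1)] else [])
          ++ pvScanRuns (i + (pvRunLen v xs).1 - 1) (pvRunLen v xs).2 := by
  induction xs with
  | nil =>
    intro acc s v i
    simp only [pvLoopB, pvRunLen, pvScanRuns_nil]
    have h1 : i + 1 - 1 = i := by omega
    rw [h1]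
    split <;> simp
  | cons x xs ih =>
    intro acc s v i
    by_cases hx : x = v
    · subst hx
      rw [pvRunLen_cons_self]
      simp only [pvLoopB, ne_eq, not_true_eq_false, ite_false]
      rw [ih]
      have h1 : i + 1 + (pvRunLen x xs).1 - 1 = i + ((pvRunLen x xs).1 + 1) - 1 := by omega
      rw [h1]
    · rw [pvRunLen_cons_ne v x xs hx]
      simp only [pvLoopB, ne_eq, hx, not_false_eq_true, if_pos]
      rw [ih]
      have h1 : i + 1 - 1 = i := by omega
      rw [h1, pvScanRuns_cons]
      have h2 : i + 1 + (pvRunLen x xs).1 - 1 = i + (pvRunLen x xs).1 := by omega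
      rw [h2]
      split <;> simp

theorem both_eq_scan (hypno : List Int) : rem_epochs_bounds hypno = rem_epochs_bounds_alt hypno := by
  cases hypno with
  | nil => simp [rem_epochs_bounds, rem_epochs_bounds_alt, pvGroupby_nil, pvWhileA]
  | cons x xs =>
    simp only [rem_epochs_bounds, rem_epochs_bounds_alt, pvWhileA_eq, List.nil_append]
    rw [pvLoopB_eq, List.nil_append]
    have h1 : (1 : Int) + (pvRunLen x xs).1 - 1 = (pvRunLen x xs).1 := by omega
    rw [h1]
    have := pvScanRuns_cons 0 x xs
    simp only [pvScanRuns, zero_add] at this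
    rw [this]
    rfl

-- ===== VERDICT (by name: the statement is the Claim_ definition above) =====
theorem rem_epochs_bounds_spec : Claim_equal_rem_epochs_bounds := by
  intro hypno _
  exact both_eq_scan hypno
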